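-- pv_equiv track=rewrite | github.com/vanbako/amber | tools/asm_stub.py | strip_comment
-- ===== SOURCE A (Python) =====
-- COMMENT_SENTINELS = ("#", "//")
--
-- def strip_comment(line: str) -> str:
--     """Remove comments while respecting single-quoted character literals."""
--     if not line:
--         return line
--     stripped = []
--     in_quote = False
--     idx = 0
--     while idx < len(line):
--         ch = line[idx]
--         if ch == "'":
--             prev_escape = idx > 0 and line[idx - 1] == "\\"
--             if not prev_escape:
--                 in_quote = not in_quote
--         if not in_quote:
--             for marker in COMMENT_SENTINELS:
--                 if line.startswith(marker, idx):
--                     return "".join(stripped)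
--         stripped.append(ch)
--         idx += 1
--     return "".join(stripped)
-- ===== SOURCE B (Python) =====
-- def strip_comment(line: str) -> str:
--     """Remove comments while respecting single-quoted character literals."""
--     cut = len(line)
--     in_quote = False
--     prev = None
--     for i, ch in enumerate(line):
--         if ch == "'" and prev != "\\":
--             in_quote = not in_quote
--         if not in_quote and (ch == "#" or (ch == "/" and i + 1 < len(line) and line[i + 1] == "/")):
--             cut = i
--             break
--         prev = ch
--     return line[:cut]
-- ===== Notes on version B (the rewrite author's own statement) =====
-- stated objective: simpler
-- what changed: B scans only to find the cut index (tracking the previous char instead of indexing back) and returns a single slice line[:cut], instead of A's character-by-character accumulator list joined at the end.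
import Mathlib
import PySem

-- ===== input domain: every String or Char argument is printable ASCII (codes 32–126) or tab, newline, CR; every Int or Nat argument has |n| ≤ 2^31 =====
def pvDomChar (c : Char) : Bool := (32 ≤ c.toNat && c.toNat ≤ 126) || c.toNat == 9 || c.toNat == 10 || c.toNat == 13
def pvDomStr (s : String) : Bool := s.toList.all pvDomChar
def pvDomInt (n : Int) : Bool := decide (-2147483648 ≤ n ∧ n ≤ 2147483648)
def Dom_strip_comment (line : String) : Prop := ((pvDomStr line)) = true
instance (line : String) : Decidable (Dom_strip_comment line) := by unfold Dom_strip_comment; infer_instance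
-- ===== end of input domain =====

-- B finds the comment's start index with the same quote rule and returns one slice line[:cut],
-- replacing A's accumulator list + join; same cost, simpler shape.

-- ===== PORT A =====
-- the while loop of A: idx-indexed scan accumulating `stripped`
def stripLoop (cs : List Char) (stripped : List Char) (inq : Bool) (idx : Nat) : List Char :=
  if h : idx < cs.length then
    let ch := cs[idx]
    let prevEscape := decide (0 < idx) && decide (cs.getD (idx - 1) ' ' = '\\')
    let inq' := if ch == '\'' && !prevEscape then !inq else inq
    if !inq' && (['#'].isPrefixOf (cs.drop idx) || ['/', '/'].isPrefixOf (cs.drop idx)) then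
      stripped
    else
      stripLoop cs (stripped ++ [ch]) inq' (idx + 1)
  else stripped
termination_by cs.length - idx

def strip_comment (line : String) : String :=
  if line.toList = [] then line
  else String.ofList (stripLoop line.toList [] false 0)

-- ===== PORT B =====
-- B's for loop: returns the cut index, carrying the previous character
def altCut : List Char → Option Char → Bool → Nat
  | [], _, _ => 0
  | c :: rest, prev, inq =>
    let inq' := if c == '\'' && !(prev == some '\\') then !inq else inq
    if !inq' && (c == '#' || (c == '/' && rest.head? == some '/')) then 0
    else 1 + altCut rest (some c) inq'

def strip_comment_alt (line : String) : String :=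
  String.ofList (line.toList.take (altCut line.toList none false))

-- ===== PRECONDITION & SPEC =====
def Spec_strip_comment (line : String) (out : String) : Prop := out = strip_comment_alt line
instance (line : String) (out : String) : Decidable (Spec_strip_comment line out) := by unfold Spec_strip_comment; infer_instance

-- ===== CLAIM (what is proved, stated in full; the proofs are below) =====
def Claim_equal_strip_comment : Prop := ∀ (line : String), Dom_strip_comment line → Spec_strip_comment line (strip_comment line)

-- ===== LEMMAS AND PROOFS =====
-- A's `line[idx-1]` view of the previous character, as B's carried Option
def prevAt (cs : List Char) (idx : Nat) : Option Char :=
  if idx = 0 then none else some (cs.getD (idx - 1) ' ')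

lemma prefixOf_slash (r : List Char) : ['/'].isPrefixOf r = (r.head? == some '/') := by
  cases r <;> simp [List.isPrefixOf, Bool.beq_comm]

lemma loop_eq (n : Nat) : ∀ (cs : List Char) (idx : Nat) (stripped : List Char) (inq : Bool),
    cs.length - idx = n → idx ≤ cs.length →
    stripLoop cs stripped inq idx =
      stripped ++ (cs.drop idx).take (altCut (cs.drop idx) (prevAt cs idx) inq) := by
  induction n with
  | zero =>
    intro cs idx stripped inq hn hle
    have hidx : idx = cs.length := by omega
    rw [stripLoop]
    simp [hidx, altCut]
  | succ n ih =>
    intro cs idx stripped inq hn hle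
    have h : idx < cs.length := by omega
    have hdrop : cs.drop idx = cs[idx] :: cs.drop (idx + 1) := List.drop_eq_getElem_cons h
    have hprev : prevAt cs (idx + 1) = some cs[idx] := by
      simp [prevAt, List.getD, List.getElem?_eq_getElem h]
    have hpe : (decide (0 < idx) && decide (cs.getD (idx - 1) ' ' = '\\'))
        = (prevAt cs idx == some '\\') := by
      rcases Nat.eq_zero_or_pos idx with h0 | h0
      · simp [h0, prevAt]
      · simp [prevAt, Nat.pos_iff_ne_zero.mp h0, h0, ← Bool.beq_eq_decide_eq]
    have hcond : (['#'].isPrefixOf (cs[idx] :: cs.drop (idx + 1)) ||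
          ['/', '/'].isPrefixOf (cs[idx] :: cs.drop (idx + 1)))
        = (cs[idx] == '#' || (cs[idx] == '/' && (cs.drop (idx + 1)).head? == some '/')) := by
      simp [List.isPrefixOf, prefixOf_slash, Bool.beq_comm]
    rw [stripLoop, dif_pos h, hdrop]
    simp only [altCut, hpe, hcond]
    set inq' := if cs[idx] == '\'' && !(prevAt cs idx == some '\\') then !inq else inq with hinq'
    by_cases hc : (!inq' && (cs[idx] == '#' ||
        (cs[idx] == '/' && (cs.drop (idx + 1)).head? == some '/'))) = true
    · rw [if_pos hc, if_pos hc]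
      simp
    · rw [if_neg hc, if_neg hc]
      rw [ih cs (idx + 1) (stripped ++ [cs[idx]]) inq' (by omega) (by omega), hprev,
        Nat.add_comm 1, List.take_succ_cons, List.append_assoc, List.singleton_append]

-- ===== VERDICT (by name: the statement is the Claim_ definition above) =====
theorem strip_comment_spec : Claim_equal_strip_comment := by
  intro line _
  unfold Spec_strip_comment strip_comment strip_comment_alt
  by_cases hempty : line.toList = []
  · rw [if_pos hempty, hempty]
    exact (String.ofList_eq.mpr hempty.symm).symm
  · rw [if_neg hempty, loop_eq (line.toList.length - 0) line.toList 0 [] false rfl (by omega)]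
    simp [prevAt]
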